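-- pv_equiv track=rewrite | github.com/Alicia0629/SIBI_chabot_diets | project/data/prep_scripts/createDatasetAllergies.py | string_terms_to_reduced_list
-- ===== SOURCE A (Python) =====
-- def string_terms_to_reduced_list(string):
--     terms = []
--     for element in string.lower().split(", "):
--         add = True
--         remove = []
--         for term in terms:
--             if term in element:
--                 add=False #We don't add this element
--                 break
--             elif element in term:
--                 remove.append(term)
--         if add:
--             terms.append(element)
--         for r in remove:
--             terms.remove(r)
--     return terms
-- ===== SOURCE B (Python) =====
-- def string_terms_to_reduced_list(string):
--     elements = string.lower().split(", ")
--     seen = set()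
--     result = []
--     for x in elements:
--         if x in seen:
--             continue
--         seen.add(x)
--         if not any(y != x and y in x for y in elements):
--             result.append(x)
--     return result
-- ===== Notes on version B (the rewrite author's own statement) =====
-- stated objective: simpler
-- what changed: A maintains a minimal-antichain list incrementally (add flag, remove list, break inside a nested scan of the current terms); B does a first-occurrence dedup and keeps an element iff no other element anywhere in the split list is a substring of it, a single global minimality test.
import Mathlib
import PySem

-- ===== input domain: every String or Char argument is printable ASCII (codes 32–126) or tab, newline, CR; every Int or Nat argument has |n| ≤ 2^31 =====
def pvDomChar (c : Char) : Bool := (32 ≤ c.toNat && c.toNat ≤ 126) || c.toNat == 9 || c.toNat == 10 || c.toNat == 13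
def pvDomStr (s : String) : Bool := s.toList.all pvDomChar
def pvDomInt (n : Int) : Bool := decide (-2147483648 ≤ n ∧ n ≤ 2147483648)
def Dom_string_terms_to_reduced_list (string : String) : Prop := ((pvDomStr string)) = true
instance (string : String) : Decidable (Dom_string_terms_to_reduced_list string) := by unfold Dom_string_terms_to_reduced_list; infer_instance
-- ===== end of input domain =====

-- B replaces A's incremental antichain maintenance (add/remove-with-break) by a single
-- first-occurrence dedup with a global per-element minimality test; objective: simpler.

-- ===== PORT A =====
-- inner 'for term in terms' loop of A: carries (add, remove); the first branch is the 'break'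
def pvInner (e : String) : List String → Bool × List String → Bool × List String
  | [], st => st
  | t :: ts, st =>
    if PySem.Str.isIn t e then (false, st.2)
    else if PySem.Str.isIn e t then pvInner e ts (st.1, st.2 ++ [t])
    else pvInner e ts st

-- terms.remove(r): Python would raise ValueError if r were absent, which is unreachable here
-- (every r in remove was read out of terms and terms only shrinks afterwards); exact when r ∈ ts
def pvRemove (ts : List String) (r : String) : List String := (PySem.List.remove? ts r).getD ts

def pvStepA (terms : List String) (e : String) : List String :=
  let ar := pvInner e terms (true, [])
  let terms1 := if ar.1 then terms ++ [e] else terms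
  ar.2.foldl pvRemove terms1

-- string.split(", "): sep is the nonempty literal ", ", so split? is always some; getD's default is unreachable
def string_terms_to_reduced_list (string : String) : List String :=
  ((PySem.Str.split? (PySem.Str.lower string) ", ").getD []).foldl pvStepA []

-- ===== PORT B =====
def string_terms_to_reduced_list_alt (string : String) : List String :=
  let elements := (PySem.Str.split? (PySem.Str.lower string) ", ").getD []
  (elements.foldl (fun (st : PySem.Set String × List String) x =>
      if PySem.Set.contains st.1 x then st
      else (PySem.Set.add st.1 x,
            if elements.any (fun y => decide (y ≠ x) && PySem.Str.isIn y x) then st.2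
            else st.2 ++ [x]))
    (PySem.Set.empty, [])).2

-- ===== PRECONDITION & SPEC =====
def Spec_string_terms_to_reduced_list (string : String) (out : List String) : Prop := out = string_terms_to_reduced_list_alt string
instance (string : String) (out : List String) : Decidable (Spec_string_terms_to_reduced_list string out) := by unfold Spec_string_terms_to_reduced_list; infer_instance

-- ===== CLAIM (what is proved, stated in full; the proofs are below) =====
def Claim_equal_string_terms_to_reduced_list : Prop := ∀ (string : String), Dom_string_terms_to_reduced_list string → Spec_string_terms_to_reduced_list string (string_terms_to_reduced_list string)

-- ===== LEMMAS AND PROOFS =====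

-- x is minimal in l: no OTHER element of l is a substring of x
def pvMin (l : List String) (x : String) : Bool :=
  !(l.any (fun y => decide (y ≠ x) && PySem.Str.isIn y x))

-- the common characterisation: first occurrences of the elements minimal in l
def pvSpecL (l : List String) : List String := (PySem.List.dedup l).filter (pvMin l)

theorem pvSub_refl (x : String) : PySem.Str.isIn x x = true := by
  rw [PySem.Str.isIn_iff_infix]

theorem pvSub_trans {a b c : String} (h1 : PySem.Str.isIn a b = true)
    (h2 : PySem.Str.isIn b c = true) : PySem.Str.isIn a c = true := by
  rw [PySem.Str.isIn_iff_infix] at *; exact h1.trans h2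

theorem pvSub_antisymm {a b : String} (h1 : PySem.Str.isIn a b = true)
    (h2 : PySem.Str.isIn b a = true) : a = b := by
  rw [PySem.Str.isIn_iff_infix] at *
  exact String.toList_inj.mp (List.infix_antisymm h1 h2)

theorem pvSub_length {a b : String} (h : PySem.Str.isIn a b = true) :
    a.toList.length ≤ b.toList.length := by
  rw [PySem.Str.isIn_iff_infix] at h; exact h.length_le

theorem pvMem_specL {l : List String} {x : String} :
    x ∈ pvSpecL l ↔ x ∈ l ∧ pvMin l x = true := by
  simp [pvSpecL, List.mem_filter]

theorem pvNodup_specL (l : List String) : (pvSpecL l).Nodup :=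
  (PySem.List.nodup_dedup l).filter _

theorem pvNotMin {l : List String} {x : String} (h : ¬ pvMin l x = true) :
    ∃ y ∈ l, y ≠ x ∧ PySem.Str.isIn y x = true := by
  have h' : (l.any fun y => decide (y ≠ x) && PySem.Str.isIn y x) = true := by
    by_contra hc
    exact h (by unfold pvMin; rw [Bool.eq_false_iff.mpr hc]; rfl)
  rw [List.any_eq_true] at h'
  obtain ⟨y, hy, hb⟩ := h'
  rw [Bool.and_eq_true, decide_eq_true_eq] at hb
  exact ⟨y, hy, hb.1, hb.2⟩

-- if y ∈ l is a substring of x and pvMin l x holds then y = x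
theorem pvMin_sub {l : List String} {x y : String} (hm : pvMin l x = true)
    (hy : y ∈ l) (hs : PySem.Str.isIn y x = true) : y = x := by
  by_contra hne
  simp only [pvMin, Bool.not_eq_eq_eq_not, Bool.not_true, List.any_eq_false] at hm
  have := hm y hy
  rw [PySem.Str.isIn_eq] at hs
  simp [hne, hs] at this

-- every element of l has a minimal (in l) substring below it
theorem pvExists_min {l : List String} {x : String} (hx : x ∈ l) :
    ∃ m, m ∈ l ∧ PySem.Str.isIn m x = true ∧ pvMin l m = true := by
  suffices h : ∀ n (x : String), x.toList.length ≤ n → x ∈ l →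
      ∃ m, m ∈ l ∧ PySem.Str.isIn m x = true ∧ pvMin l m = true from h _ x le_rfl hx
  clear hx
  intro n
  induction n with
  | zero =>
    intro x hlen hx
    by_cases hm : pvMin l x = true
    · exact ⟨x, hx, pvSub_refl x, hm⟩
    · exfalso
      obtain ⟨y, hy, hne, hs'⟩ := pvNotMin hm
      have := pvSub_length hs'
      have hy0 : y.toList.length = 0 := by omega
      have hx0 : x.toList.length = 0 := by omega
      exact hne (String.toList_inj.mp (by rw [List.length_eq_zero_iff] at hy0 hx0; rw [hy0, hx0]))
  | succ n ih =>
    intro x hlen hx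
    by_cases hm : pvMin l x = true
    · exact ⟨x, hx, pvSub_refl x, hm⟩
    · obtain ⟨y, hy, hne, hs'⟩ := pvNotMin hm
      have hlt : y.toList.length < x.toList.length := by
        have hle := pvSub_length hs'
        rcases lt_or_eq_of_le hle with h | h
        · exact h
        · exfalso
          have : y.toList = x.toList := by
            rw [PySem.Str.isIn_iff_infix] at hs'
            exact List.IsInfix.eq_of_length hs' h
          exact hne (String.toList_inj.mp this)
      obtain ⟨m, hml, hmy, hmm⟩ := ih y (by omega) hy
      exact ⟨m, hml, pvSub_trans hmy hs', hmm⟩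

-- antichain property of pvSpecL
theorem pvAntichain {l : List String} {x y : String} (hx : x ∈ pvSpecL l)
    (hy : y ∈ pvSpecL l) (hs : PySem.Str.isIn y x = true) : y = x :=
  pvMin_sub (pvMem_specL.mp hx).2 (pvMem_specL.mp hy).1 hs

-- inner-loop characterisation when some term is a substring of e and the elif can never fire
theorem pvInner_hit {e : String} {ts : List String}
    (h : ∃ t ∈ ts, PySem.Str.isIn t e = true)
    (h2 : ∀ x ∈ ts, PySem.Str.isIn e x = true → PySem.Str.isIn x e = true)
    (st : Bool × List String) : pvInner e ts st = (false, st.2) := by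
  induction ts generalizing st with
  | nil => simp at h
  | cons t ts ih =>
    by_cases h1 : PySem.Str.isIn t e = true
    · rw [pvInner, if_pos h1]
    · have helif : ¬ PySem.Str.isIn e t = true := by
        intro hc
        exact h1 (h2 t (List.mem_cons_self) hc)
      obtain ⟨w, hw, hwe⟩ := h
      have hw' : w ∈ ts := by
        rcases List.mem_cons.mp hw with rfl | h'
        · exact absurd hwe h1
        · exact h'
      rw [pvInner, if_neg h1, if_neg helif]
      exact ih ⟨w, hw', hwe⟩ (fun x hx => h2 x (List.mem_cons_of_mem _ hx)) st

-- inner-loop characterisation when no term is a substring of e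
theorem pvInner_miss {e : String} {ts : List String}
    (h : ∀ t ∈ ts, PySem.Str.isIn t e = false) (st : Bool × List String) :
    pvInner e ts st = (st.1, st.2 ++ ts.filter (fun t => PySem.Str.isIn e t)) := by
  induction ts generalizing st with
  | nil => simp [pvInner]
  | cons t ts ih =>
    have h1 : ¬ PySem.Str.isIn t e = true := ne_true_of_eq_false (h t List.mem_cons_self)
    rw [pvInner, if_neg h1]
    by_cases he : PySem.Str.isIn e t = true
    · rw [if_pos he, ih (fun x hx => h x (List.mem_cons_of_mem _ hx))]
      rw [List.filter_cons, if_pos he]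
      simp
    · rw [if_neg he, ih (fun x hx => h x (List.mem_cons_of_mem _ hx))]
      rw [List.filter_cons, if_neg he]

theorem pvRemove_eq_erase (ts : List String) (r : String) : pvRemove ts r = ts.erase r := by
  by_cases h : r ∈ ts
  · simp [pvRemove, PySem.List.remove?_eq_some_erase ts r h]
  · have hn : PySem.List.remove? ts r = none := (PySem.List.remove?_eq_none_iff ts r).mpr h
    simp [pvRemove, hn, List.erase_of_not_mem h]

theorem pvFoldl_remove (l rs : List String) (h : l.Nodup) :
    rs.foldl pvRemove l = l.filter (fun x => decide (x ∉ rs)) := by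
  have : rs.foldl pvRemove l = rs.foldl List.erase l := by
    induction rs generalizing l with
    | nil => rfl
    | cons r rs ih =>
        rw [List.foldl_cons, List.foldl_cons, pvRemove_eq_erase]
        exact ih _ (h.erase r)
  rw [this, ← List.diff_eq_foldl, List.Nodup.diff_eq_filter h]

theorem pvDedup_append (q : List String) (e : String) :
    PySem.List.dedup (q ++ [e]) =
      if e ∈ q then PySem.List.dedup q else PySem.List.dedup q ++ [e] := by
  have h : PySem.Set.ofList (q ++ [e]) = PySem.Set.add (PySem.Set.ofList q) e := by
    rw [PySem.Set.ofList_eq_foldl, PySem.Set.ofList_eq_foldl, List.foldl_append]; rfl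
  simp only [PySem.List.dedup_eq_ofList, h, PySem.Set.add]
  by_cases he : e ∈ q
  · simp [PySem.Set.mem_ofList, he]
  · simp [PySem.Set.mem_ofList, he]

theorem pvMin_append (q : List String) (e x : String) :
    pvMin (q ++ [e]) x = (pvMin q x && !(decide (e ≠ x) && PySem.Str.isIn e x)) := by
  simp [pvMin]

-- the key step lemma: A's loop body maps pvSpecL q to pvSpecL (q ++ [e])
theorem pvStepA_spec (q : List String) (e : String) :
    pvStepA (pvSpecL q) e = pvSpecL (q ++ [e]) := by
  by_cases hhit : ∃ t ∈ pvSpecL q, PySem.Str.isIn t e = true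
  · -- some kept term is a substring of e: A neither adds nor removes anything
    obtain ⟨t, ht, hte⟩ := hhit
    have h2 : ∀ x ∈ pvSpecL q, PySem.Str.isIn e x = true → PySem.Str.isIn x e = true := by
      intro x hx hex
      have htx : t = x := pvAntichain hx ht (pvSub_trans hte hex)
      rw [← htx]; exact hte
    have hxe_eq : ∀ x ∈ pvSpecL q, PySem.Str.isIn e x = true → e = x := fun x hx hex =>
      pvSub_antisymm hex (h2 x hx hex)
    unfold pvStepA
    rw [pvInner_hit ⟨t, ht, hte⟩ h2 (true, [])]
    simp only [List.foldl_nil, Bool.false_eq_true, if_false]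
    have hfac : ∀ x ∈ PySem.List.dedup q, pvMin q x = pvMin (q ++ [e]) x := by
      intro x hxd
      rw [pvMin_append]
      by_cases hminx : pvMin q x = true
      · have hx : x ∈ pvSpecL q := pvMem_specL.mpr ⟨(PySem.List.mem_dedup q x).mp hxd, hminx⟩
        have hb : (!(decide (e ≠ x) && PySem.Str.isIn e x)) = true := by
          by_cases hex : PySem.Str.isIn e x = true
          · rw [hxe_eq x hx hex]; simp
          · rw [Bool.eq_false_iff.mpr hex, Bool.and_false]; rfl
        rw [hminx, hb]; rfl
      · rw [Bool.eq_false_iff.mpr hminx]; rfl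
    unfold pvSpecL
    rw [pvDedup_append]
    by_cases heq : e ∈ q
    · rw [if_pos heq]
      exact List.filter_congr hfac
    · rw [if_neg heq, List.filter_append, List.filter_cons, List.filter_nil]
      have hmine : pvMin (q ++ [e]) e = false := by
        apply Bool.eq_false_iff.mpr; intro hmm
        have htq : t ∈ q := (pvMem_specL.mp ht).1
        have hne : t ≠ e := fun h => heq (h ▸ htq)
        exact hne (pvMin_sub hmm (List.mem_append_left _ htq) hte)
      rw [hmine]
      simp only [Bool.false_eq_true, if_false, List.append_nil]
      exact List.filter_congr hfac
  · -- no kept term is a substring of e: A appends e and removes the terms containing e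
    have hmiss : ∀ t ∈ pvSpecL q, PySem.Str.isIn t e = false := by
      intro t ht
      apply Bool.eq_false_iff.mpr; intro hc
      exact hhit ⟨t, ht, hc⟩
    have henq : e ∉ q := by
      intro he
      obtain ⟨m, hml, hme, hmm⟩ := pvExists_min he
      rw [hmiss m (pvMem_specL.mpr ⟨hml, hmm⟩)] at hme
      cases hme
    have henS : e ∉ pvSpecL q := by
      intro hx
      have := hmiss e hx
      rw [pvSub_refl] at this
      cases this
    unfold pvStepA
    rw [pvInner_miss hmiss (true, [])]
    simp only [List.nil_append, if_true]
    have hnd : (pvSpecL q ++ [e]).Nodup := by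
      rw [List.nodup_append]
      refine ⟨pvNodup_specL q, List.nodup_singleton e, ?_⟩
      intro a ha b hb
      rw [List.mem_singleton] at hb
      intro hab
      exact henS ((hab.trans hb) ▸ ha)
    rw [pvFoldl_remove _ _ hnd, List.filter_append]
    have herm : e ∉ (pvSpecL q).filter (fun t => PySem.Str.isIn e t) :=
      fun hc => henS (List.mem_of_mem_filter hc)
    have hmine : pvMin (q ++ [e]) e = true := by
      by_contra hc
      obtain ⟨y, hy, hyne, hys⟩ := pvNotMin hc
      have hyq : y ∈ q := by
        rcases List.mem_append.mp hy with h | h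
        · exact h
        · exact absurd (List.mem_singleton.mp h) hyne
      obtain ⟨m, hml, hmy, hmm⟩ := pvExists_min hyq
      have hme : PySem.Str.isIn m e = true := pvSub_trans hmy hys
      rw [hmiss m (pvMem_specL.mpr ⟨hml, hmm⟩)] at hme
      cases hme
    -- left parts: the survivors of the remove pass are exactly the new minimal old terms
    have hleft : (pvSpecL q).filter
          (fun x => decide (x ∉ (pvSpecL q).filter (fun t => PySem.Str.isIn e t)))
        = (PySem.List.dedup q).filter (pvMin (q ++ [e])) := by
      have h1 : (PySem.List.dedup q).filter (pvMin (q ++ [e]))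
          = (pvSpecL q).filter (fun x => !(decide (e ≠ x) && PySem.Str.isIn e x)) := by
        unfold pvSpecL
        rw [List.filter_filter]
        apply List.filter_congr
        intro x hxd
        rw [pvMin_append, Bool.and_comm]
      rw [h1]
      apply List.filter_congr
      intro x hx
      have hxq : x ∈ q := (pvMem_specL.mp hx).1
      have hne : e ≠ x := fun h => henq (h ▸ hxq)
      rw [decide_eq_true hne, Bool.true_and]
      by_cases hex : PySem.Str.isIn e x = true
      · have hex' := hex
        rw [PySem.Str.isIn_eq] at hex'
        rw [hex]
        simp [List.mem_filter, hx, hex']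
      · have hex' : PySem.Str.isIn e x = false := Bool.eq_false_iff.mpr hex
        have hex'' := hex'
        rw [PySem.Str.isIn_eq] at hex''
        rw [hex']
        simp [List.mem_filter, hex'']
    rw [hleft]
    unfold pvSpecL
    rw [pvDedup_append, if_neg henq, List.filter_append]
    congr 1
    have herm' : e ∉ List.filter (fun t => PySem.Str.isIn e t)
        (List.filter (pvMin q) (PySem.List.dedup q)) := herm
    rw [List.filter_cons, List.filter_cons, List.filter_nil,
      if_pos (decide_eq_true herm'), if_pos hmine, List.filter_nil]

theorem pvFoldA (p : List String) : p.foldl pvStepA [] = pvSpecL p := by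
  induction p using List.reverseRecOn with
  | nil => rfl
  | append_singleton q e ih => rw [List.foldl_append, List.foldl_cons, List.foldl_nil, ih, pvStepA_spec]

theorem pvFoldB (es p : List String) :
    p.foldl (fun (st : PySem.Set String × List String) x =>
      if PySem.Set.contains st.1 x then st
      else (PySem.Set.add st.1 x,
            if es.any (fun y => decide (y ≠ x) && PySem.Str.isIn y x) then st.2
            else st.2 ++ [x])) (PySem.Set.empty, [])
    = (PySem.Set.ofList p, (PySem.List.dedup p).filter (pvMin es)) := by
  induction p using List.reverseRecOn with
  | nil => rfl
  | append_singleton q x ih =>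
    rw [List.foldl_append, ih, List.foldl_cons, List.foldl_nil]
    have hof : PySem.Set.ofList (q ++ [x]) = PySem.Set.add (PySem.Set.ofList q) x := by
      rw [PySem.Set.ofList_eq_foldl, PySem.Set.ofList_eq_foldl, List.foldl_append]; rfl
    rw [pvDedup_append, hof]
    by_cases hx : x ∈ q
    · have hc : PySem.Set.contains (PySem.Set.ofList q) x = true := by
        rw [PySem.Set.contains_iff]; exact (PySem.Set.mem_ofList q x).mpr hx
      rw [if_pos hc, if_pos hx, PySem.Set.add, if_pos hc]
    · have hc : ¬ PySem.Set.contains (PySem.Set.ofList q) x = true := by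
        rw [PySem.Set.contains_iff, PySem.Set.mem_ofList]; exact hx
      rw [if_neg hc, if_neg hx, List.filter_append, List.filter_cons, List.filter_nil]
      unfold pvMin
      by_cases hm : (es.any fun y => decide (y ≠ x) && PySem.Str.isIn y x) = true
      · rw [if_pos hm, if_neg (by rw [hm]; exact Bool.false_ne_true), List.append_nil]
      · rw [if_neg hm, if_pos (by rw [Bool.eq_false_iff.mpr hm]; rfl)]

-- ===== VERDICT (by name: the statement is the Claim_ definition above) =====
theorem string_terms_to_reduced_list_spec : Claim_equal_string_terms_to_reduced_list := by
  intro s _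
  unfold Spec_string_terms_to_reduced_list string_terms_to_reduced_list string_terms_to_reduced_list_alt
  simp only [pvFoldA, pvFoldB]
  rfl
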